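-- pv_equiv track=rewrite | github.com/gesmith19/mit | ProblemSet6/ps6p1c.py | buildCoder
-- ===== SOURCE A (Python) =====
-- import string
--
-- def buildCoder(shift):
--
--     d = {}
--
--     uc = string.ascii_uppercase
--     lc = string.ascii_lowercase
--
--
--     for i in range(len(uc)):
--         d[uc[i]]=uc[(i+shift)%26]
--
--     for j in range(len(uc), len(lc) + len(uc)):
--         d[lc[j%26]] = lc[(j+shift)%26]
--     return d
-- ===== SOURCE B (Python) =====
-- import string
--
-- def buildCoder(shift):
--     s = shift % 26
--     uc = string.ascii_uppercase
--     lc = string.ascii_lowercase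
--     ruc = uc[s:] + uc[:s]
--     rlc = lc[s:] + lc[:s]
--     return dict(zip(uc + lc, ruc + rlc))
-- ===== Notes on version B (the rewrite author's own statement) =====
-- stated objective: idiomatic
-- what changed: B builds the two rotated alphabets once by slicing (uc[s:]+uc[:s] with s = shift % 26) and pairs them with the plain alphabets via dict(zip(...)), replacing A's two index loops with per-character modular arithmetic.
import Mathlib
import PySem

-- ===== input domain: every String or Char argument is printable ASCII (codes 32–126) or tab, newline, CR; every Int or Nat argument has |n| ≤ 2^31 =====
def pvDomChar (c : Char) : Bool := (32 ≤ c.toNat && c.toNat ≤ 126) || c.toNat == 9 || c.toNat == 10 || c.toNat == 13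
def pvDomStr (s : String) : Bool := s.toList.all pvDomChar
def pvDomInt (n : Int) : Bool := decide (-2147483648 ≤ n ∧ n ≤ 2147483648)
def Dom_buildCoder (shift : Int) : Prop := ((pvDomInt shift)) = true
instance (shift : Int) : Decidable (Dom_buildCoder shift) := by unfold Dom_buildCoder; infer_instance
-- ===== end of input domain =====

-- B builds the rotated alphabets once by slicing and zips them with the plain alphabets,
-- replacing A's two index loops with per-character modular arithmetic (idiomatic rewrite).

-- ===== PORT A =====
def pvUC : List Char := "ABCDEFGHIJKLMNOPQRSTUVWXYZ".toList
def pvLC : List Char := "abcdefghijklmnopqrstuvwxyz".toList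

-- uc[i] in Python is a one-character string: ported as String.ofList [·] of the indexed char.
-- Every index taken is in range, so pyGetD with a dummy default is exact here.
def buildCoder (shift : Int) : List (String × String) :=
  let d : PySem.Dict String String := PySem.Dict.empty
  let d := (PySem.List.pyRange 0 26 1).foldl (fun d i =>
      d.insert (String.ofList [PySem.List.pyGetD pvUC i ' '])
               (String.ofList [PySem.List.pyGetD pvUC (PySem.Int.mod (i + shift) 26) ' '])) d
  let d := (PySem.List.pyRange 26 52 1).foldl (fun d j =>
      d.insert (String.ofList [PySem.List.pyGetD pvLC (PySem.Int.mod j 26) ' '])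
               (String.ofList [PySem.List.pyGetD pvLC (PySem.Int.mod (j + shift) 26) ' '])) d
  d.items

-- ===== PORT B =====
def buildCoder_alt (shift : Int) : List (String × String) :=
  let s := PySem.Int.mod shift 26
  let ruc := PySem.List.slice pvUC (some s) none ++ PySem.List.slice pvUC none (some s)
  let rlc := PySem.List.slice pvLC (some s) none ++ PySem.List.slice pvLC none (some s)
  (PySem.Dict.ofList (List.zip ((pvUC ++ pvLC).map fun c => String.ofList [c])
                               ((ruc ++ rlc).map fun c => String.ofList [c]))).items

-- ===== PRECONDITION & SPEC =====
def Spec_buildCoder (shift : Int) (out : List (String × String)) : Prop := out = buildCoder_alt shift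
instance (shift : Int) (out : List (String × String)) : Decidable (Spec_buildCoder shift out) := by unfold Spec_buildCoder; infer_instance

-- ===== CLAIM (what is proved, stated in full; the proofs are below) =====
def Claim_equal_buildCoder : Prop := ∀ (shift : Int), Dom_buildCoder shift → Spec_buildCoder shift (buildCoder shift)

-- ===== LEMMAS AND PROOFS =====
theorem pvMod_congr (i shift r : Int) (h : PySem.Int.mod shift 26 = PySem.Int.mod r 26) :
    PySem.Int.mod (i + shift) 26 = PySem.Int.mod (i + r) 26 := by
  rw [PySem.Int.mod_eq_emod_of_pos (by norm_num), PySem.Int.mod_eq_emod_of_pos (by norm_num)]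
  rw [PySem.Int.mod_eq_emod_of_pos (by norm_num), PySem.Int.mod_eq_emod_of_pos (by norm_num)] at h
  omega

theorem buildCoder_mod (shift r : Int) (h : PySem.Int.mod shift 26 = PySem.Int.mod r 26) :
    buildCoder shift = buildCoder r := by
  unfold buildCoder
  simp only [pvMod_congr _ shift r h]

theorem buildCoder_alt_mod (shift r : Int) (h : PySem.Int.mod shift 26 = PySem.Int.mod r 26)
    (hr : PySem.Int.mod r 26 = r) : buildCoder_alt shift = buildCoder_alt r := by
  unfold buildCoder_alt
  rw [h, hr]

set_option maxRecDepth 20000 in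
set_option maxHeartbeats 2000000 in
theorem buildCoder_all26 : ∀ r ∈ List.range 26, buildCoder (r : Int) = buildCoder_alt (r : Int) := by
  decide

-- ===== VERDICT (by name: the statement is the Claim_ definition above) =====
theorem buildCoder_spec : Claim_equal_buildCoder := by
  intro shift _
  unfold Spec_buildCoder
  set r := PySem.Int.mod shift 26 with hr
  have hmod : PySem.Int.mod shift 26 = PySem.Int.mod r 26 := by
    rw [hr, PySem.Int.mod_eq_emod_of_pos (by norm_num), PySem.Int.mod_eq_emod_of_pos (by norm_num)]
    omega
  have hidem : PySem.Int.mod r 26 = r := by rw [← hmod]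
  have hb : 0 ≤ r ∧ r < 26 := by
    rw [hr, PySem.Int.mod_eq_emod_of_pos (by norm_num)]; omega
  rw [buildCoder_mod shift r hmod, buildCoder_alt_mod shift r hmod hidem]
  have hlt : r.toNat < 26 := by omega
  have hcast : ((r.toNat : Nat) : Int) = r := by omega
  have h := buildCoder_all26 r.toNat (List.mem_range.mpr hlt)
  rw [hcast] at h
  exact h
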